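-- pv_equiv track=rewrite | github.com/Kawser-nerd/CLCDSA | Source Codes/CodeJamData/09/41/8.py | solve
-- ===== SOURCE A (Python) =====
-- def make_swaps(matrix, i, j):
--     moves = 0
--     while j > i:
--         matrix[j], matrix[j - 1] = matrix[j - 1], matrix[j]
--         j -= 1
--         moves += 1
--     return moves
--
-- def last_one(row):
--     positions = [pos for pos, num in enumerate(row) if num == '1']
--     return 0 if len(positions) == 0 else max(positions)
--
-- def solve(matrix):
--     moves = 0
--     N = len(matrix)
--     for i in range(0, N):
--         for j in range(i, N):
--             if last_one(matrix[j]) <= i: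
--                 moves += make_swaps(matrix, i, j)
--                 break
--     return moves
-- ===== SOURCE B (Python) =====
-- def last_idx(row):
--     p = 0
--     for k, c in enumerate(row):
--         if c == '1':
--             p = k
--     return p
--
-- def solve(matrix):
--     # Work-list of last-'1' indices, kept reversed so that the frequent
--     # removal at the logical head is an O(1) pop from the end; each round
--     # removes the first (logically) entry <= i, adding its offset among the
--     # remaining entries, or discards the logical head; placed rows leave the
--     # state entirely (no swap simulation, no mutation of `matrix`).
--     xs = [last_idx(r) for r in matrix]
--     xs.reverse()
--     moves = 0
--     i = 0
--     while xs:
--         k = len(xs) - 1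
--         while k >= 0 and xs[k] > i:
--             k -= 1
--         if k >= 0:
--             moves += len(xs) - 1 - k
--             del xs[k]
--         else:
--             xs.pop()
--         i += 1
--     return moves
-- ===== Notes on version B (the rewrite author's own statement) =====
-- stated objective: alternative
-- what changed: B collapses the matrix once to a list of last-'1' indices and consumes a shrinking reversed work-list (remove the first logical entry <= i adding its offset directly, or pop the logical head) instead of A's triple-nested simulation that rescans each row with last_one and bubbles whole rows by adjacent swaps; worst case drops from O(N^2*L + N^3) to O(N*L + N^2).
import Mathlib
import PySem

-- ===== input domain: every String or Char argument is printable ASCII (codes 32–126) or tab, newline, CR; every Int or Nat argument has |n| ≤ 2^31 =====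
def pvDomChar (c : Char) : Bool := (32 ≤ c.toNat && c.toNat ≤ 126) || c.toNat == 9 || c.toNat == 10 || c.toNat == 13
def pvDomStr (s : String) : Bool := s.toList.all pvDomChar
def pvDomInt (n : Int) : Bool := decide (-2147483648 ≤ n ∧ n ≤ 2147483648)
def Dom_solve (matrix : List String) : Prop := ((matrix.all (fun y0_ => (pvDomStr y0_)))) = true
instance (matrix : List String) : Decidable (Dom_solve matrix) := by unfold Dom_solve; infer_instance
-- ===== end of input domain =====

-- B reduces the matrix once to its list of last-'1' indices and consumes a
-- shrinking, reversed work-list (remove the first logical entry ≤ i, adding its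
-- offset, or discard the logical head), instead of A's nested rescans and
-- adjacent-swap simulation on the row list.
-- A mutates its argument in place (row swaps); the equivalence proved here is
-- about the RETURN value only (B does not mutate).

-- ===== PORT A =====

-- positions = [pos for pos, num in enumerate(row) if num == '1']
def posA (cs : List Char) : List Int :=
  (PySem.List.enumerate cs).filterMap (fun pc => if pc.2 = '1' then some pc.1 else none)

-- last_one(row)
def lastOneA (row : String) : Int :=
  let positions := posA row.toList
  if positions.length = 0 then 0 else
    match PySem.List.max? positions (fun x => x) with
    | some v => v
    | none => 0

-- make_swaps(matrix, i, j): the while loop; the tuple assignment is the two `set`s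
def makeSwapsA (m : List String) (i j : Nat) : List String × Int :=
  if h : j > i then
    let m' := (m.set j (m.getD (j - 1) "")).set (j - 1) (m.getD j "")
    let r := makeSwapsA m' i (j - 1)
    (r.1, r.2 + 1)
  else (m, 0)
termination_by j
decreasing_by omega

-- the inner `for j in range(i, N)` with its break
def innerA (m : List String) (i j N : Nat) : List String × Int :=
  if _h : j < N then
    if lastOneA (m.getD j "") ≤ (i : Int) then makeSwapsA m i j
    else innerA m i (j + 1) N
  else (m, 0)
termination_by N - j

-- the outer `for i in range(0, N)`
def outerA (m : List String) (i N : Nat) (moves : Int) : Int :=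
  if _h : i < N then
    let r := innerA m i i N
    outerA r.1 (i + 1) N (moves + r.2)
  else moves
termination_by N - i

def solve (matrix : List String) : Int := outerA matrix 0 matrix.length 0

-- ===== PORT B =====

-- last_idx(row): single pass `for k, c in enumerate(row): if c == '1': p = k`
def lastIdxB (row : String) : Int :=
  (PySem.List.enumerate row.toList).foldl
    (fun p kc => if kc.2 = '1' then kc.1 else p) 0

-- the `while k >= 0 and xs[k] > i: k -= 1` scan (downwards over the reversed list)
def scanB (xs : List Int) (i k : Int) : Int :=
  if h : 0 ≤ k ∧ i < (PySem.List.pyGet? xs k).getD 0 then scanB xs i (k - 1) else k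
termination_by (k + 1).toNat
decreasing_by omega

-- needed by loopB's termination: the scan only moves downwards
theorem scanB_le (xs : List Int) (i k : Int) : scanB xs i k ≤ k := by
  rw [scanB]
  split_ifs with h
  · have := scanB_le xs i (k - 1); omega
  · exact le_refl k
termination_by (k + 1).toNat
decreasing_by omega

-- the `while xs:` loop: `del xs[k]` (cost = offset among remaining) or `xs.pop()`
def loopB (xs : List Int) (i moves : Int) : Int :=
  match xs with
  | [] => moves
  | v :: t =>
    let k := scanB (v :: t) i (((v :: t).length : Int) - 1)
    if _h : 0 ≤ k then
      loopB ((v :: t).eraseIdx k.toNat) (i + 1)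
        (moves + (((v :: t).length : Int) - 1 - k))
    else loopB ((v :: t).dropLast) (i + 1) moves
termination_by xs.length
decreasing_by
  · have hle := scanB_le (v :: t) i (((v :: t).length : Int) - 1)
    have hl : (v :: t).length = t.length + 1 := rfl
    rw [List.length_eraseIdx]
    split_ifs <;> omega
  · have hl : (v :: t).length = t.length + 1 := rfl
    rw [List.length_dropLast]
    omega

def solve_alt (matrix : List String) : Int :=
  loopB ((matrix.map lastIdxB).reverse) 0 0

-- ===== PRECONDITION & SPEC =====
def Spec_solve (matrix : List String) (out : Int) : Prop := out = solve_alt matrix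
instance (matrix : List String) (out : Int) : Decidable (Spec_solve matrix out) := by unfold Spec_solve; infer_instance

-- ===== CLAIM (what is proved, stated in full; the proofs are below) =====
def Claim_equal_solve : Prop := ∀ (matrix : List String), Dom_solve matrix → Spec_solve matrix (solve matrix)

-- ===== LEMMAS AND PROOFS =====

theorem posA_append_singleton (cs : List Char) (c : Char) :
    posA (cs ++ [c]) = posA cs ++ (if c = '1' then [(cs.length : Int)] else []) := by
  simp only [posA, PySem.List.enumerate_append, PySem.List.enumerate_cons,
        PySem.List.enumerate_nil, List.filterMap_append]
  split <;> simp_all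

theorem posA_lt (cs : List Char) : ∀ x ∈ posA cs, x < (cs.length : Int) := by
  intro x hx
  simp only [posA, List.mem_filterMap] at hx
  obtain ⟨pc, hpc, hfx⟩ := hx
  rw [PySem.List.mem_enumerate_iff] at hpc
  obtain ⟨k, hk, rfl⟩ := hpc
  split at hfx
  · cases hfx; push_cast; omega
  · cases hfx

theorem last_eq_aux (cs : List Char) :
    (PySem.List.enumerate cs).foldl (fun p kc => if kc.2 = '1' then kc.1 else p) 0
      = (if (posA cs).length = 0 then 0 else
          match PySem.List.max? (posA cs) (fun x => x) with
          | some v => v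
          | none => 0) := by
  induction cs using List.reverseRecOn with
  | nil => simp [posA, PySem.List.enumerate_nil]
  | append_singleton cs c ih =>
    rw [PySem.List.enumerate_append, List.foldl_append, ih, posA_append_singleton]
    simp only [PySem.List.enumerate_cons, PySem.List.enumerate_nil, List.foldl_cons,
      List.foldl_nil]
    by_cases hc : c = '1'
    · rcases h : posA cs with _ | ⟨x, t⟩
      · simp [hc, PySem.List.max?_id_cons]
      · have hmax := PySem.List.max?_id_cons (κ := Int) x t
        have hmem : (t.foldl max x) ∈ (x :: t) := PySem.List.max?_mem hmax
        have hlt : (t.foldl max x) < (cs.length : Int) := posA_lt cs _ (h ▸ hmem)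
        simp [hc, PySem.List.max?_id_cons, List.foldl_append,
          max_eq_right hlt.le]
    · simp [hc]

theorem lastB_eq_lastA (row : String) : lastIdxB row = lastOneA row := by
  simpa [lastIdxB, lastOneA] using last_eq_aux row.toList

-- the swap-then-erase identity behind make_swaps
theorem erase_swap (m : List String) (j : Nat) (hj : j + 1 < m.length) :
    (((m.set (j + 1) (m.getD j "")).set j (m.getD (j + 1) "")).eraseIdx j)
      = m.eraseIdx (j + 1) := by
  have hga : m.getD j "" = m[j]'(by omega) := List.getD_eq_getElem m "" (by omega)
  have hgb : m.getD (j + 1) "" = m[j + 1]'hj := List.getD_eq_getElem m "" hj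
  rw [hga, hgb]
  apply List.ext_getElem
  · simp only [List.length_eraseIdx, List.length_set]
    split_ifs <;> omega
  · intro k h1 h2
    rw [List.getElem_eraseIdx, List.getElem_eraseIdx]
    by_cases hk : k < j
    · rw [dif_pos hk, dif_pos (by omega)]
      simp only [List.getElem_set]
      split_ifs <;> first | rfl | omega
    · by_cases hk2 : k = j
      · subst hk2
        rw [dif_neg (by omega), dif_pos (by omega)]
        simp only [List.getElem_set]
        split_ifs <;> first | rfl | omega
      · rw [dif_neg hk, dif_neg (by omega)]
        simp only [List.getElem_set]
        split_ifs <;> first | rfl | omega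

-- closed form of make_swaps
theorem makeSwapsA_eq (m : List String) (i j : Nat) (hij : i ≤ j) (hj : j < m.length) :
    makeSwapsA m i j
      = (m.take i ++ m.getD j "" :: ((m.eraseIdx j).drop i), (j : Int) - (i : Int)) := by
  induction j generalizing m with
  | zero =>
    have hi0 : i = 0 := by omega
    subst hi0
    rw [makeSwapsA, dif_neg (lt_irrefl 0)]
    cases m with
    | nil => simp at hj
    | cons a t => simp [List.eraseIdx]
  | succ j ih =>
    by_cases hii : i = j + 1
    · subst hii
      rw [makeSwapsA, dif_neg (by omega : ¬ (j + 1 > j + 1))]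
      have hget : m.getD (j + 1) "" = m[j + 1] := List.getD_eq_getElem m "" hj
      simp only [Prod.mk.injEq]
      refine ⟨?_, by omega⟩
      rw [hget, List.eraseIdx_eq_take_drop_succ]
      rw [List.drop_left' (by rw [List.length_take]; omega)]
      rw [List.getElem_cons_drop]
      exact (List.take_append_drop (j + 1) m).symm
    · have hij' : i ≤ j := by omega
      rw [makeSwapsA, dif_pos (by omega : j + 1 > i)]
      have hset : j + 1 - 1 = j := by omega
      rw [hset]
      dsimp only
      set m' := (m.set (j + 1) (m.getD j "")).set j (m.getD (j + 1) "") with hm'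
      have hlen' : m'.length = m.length := by simp [hm']
      rw [ih m' hij' (by omega)]
      have hj' : j < m'.length := by omega
      have hgj : m'.getD j "" = m.getD (j + 1) "" := by
        simp only [List.getD_eq_getElem?_getD, hm']
        rw [List.getElem?_set_self (by simp; omega)]
        rfl
      have htk : m'.take i = m.take i := by
        rw [hm', List.take_set_of_le (by omega), List.take_set_of_le (by omega)]
      have her : m'.eraseIdx j = m.eraseIdx (j + 1) := erase_swap m j hj
      rw [hgj, htk, her]
      simp only [Prod.mk.injEq, true_and]
      push_cast; omega

-- proof-side forward description of the work-list round: offset of the first entry ≤ i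
def findK (xs : List Int) (i : Int) : Option Nat :=
  match xs with
  | [] => none
  | v :: t => if v ≤ i then some 0 else (findK t i).map (· + 1)

theorem findK_lt (xs : List Int) (i : Int) (k : Nat) (h : findK xs i = some k) :
    k < xs.length := by
  induction xs generalizing k with
  | nil => simp [findK] at h
  | cons v t ih =>
    simp only [findK] at h
    by_cases hv : v ≤ i
    · rw [if_pos hv] at h; cases h; simp
    · rw [if_neg hv] at h
      cases hft : findK t i with
      | none => rw [hft] at h; simp at h
      | some k' =>
        rw [hft] at h; simp only [Option.map_some] at h
        cases h; have := ih k' hft; simp; omega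

-- proof-side forward version of B's loop (on the logical, unreversed work-list)
def loopF (xs : List Int) (i moves : Int) : Int :=
  match xs with
  | [] => moves
  | v :: t =>
    match h : findK (v :: t) i with
    | some k => loopF ((v :: t).eraseIdx k) (i + 1) (moves + (k : Int))
    | none => loopF t (i + 1) moves
termination_by xs.length
decreasing_by
  · have hk := findK_lt _ _ _ h
    rw [List.length_eraseIdx, if_pos hk]
    simp only [List.length_cons]; omega
  · simp

theorem loopB_nil (i moves : Int) : loopB [] i moves = moves := by rw [loopB]

theorem loopF_nil (i moves : Int) : loopF [] i moves = moves := by rw [loopF]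

theorem loopF_some (v : Int) (t : List Int) (i moves : Int) (k : Nat)
    (h : findK (v :: t) i = some k) :
    loopF (v :: t) i moves = loopF ((v :: t).eraseIdx k) (i + 1) (moves + (k : Int)) := by
  rw [loopF, h]

theorem loopF_none (v : Int) (t : List Int) (i moves : Int)
    (h : findK (v :: t) i = none) :
    loopF (v :: t) i moves = loopF t (i + 1) moves := by
  rw [loopF, h]

-- erasing inside a dropped list commutes with the drop
theorem drop_eraseIdx {α : Type} (l : List α) (n k : Nat) :
    (l.drop n).eraseIdx k = (l.eraseIdx (n + k)).drop n := by
  induction l generalizing n with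
  | nil => simp
  | cons a t ih =>
    cases n with
    | zero => simp
    | succ n =>
      have h1 : n + 1 + k = (n + k) + 1 := by omega
      rw [List.drop_succ_cons, ih, h1, List.eraseIdx_cons_succ, List.drop_succ_cons]

-- the inner loop of A, expressed through the search on the dropped index list
theorem innerA_eq (m : List String) (i j : Nat) (hij : i ≤ j) :
    innerA m i j m.length =
      (match findK ((m.map lastOneA).drop j) (i : Int) with
        | some k => (m.take i ++ m.getD (j + k) "" :: ((m.eraseIdx (j + k)).drop i),
            ((j + k : Nat) : Int) - (i : Int))
        | none => (m, 0)) := by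
  induction' hn : m.length - j with n ihn generalizing j
  · have hdrop : (m.map lastOneA).drop j = [] :=
      List.drop_eq_nil_of_le (by simp; omega)
    rw [innerA, dif_neg (by omega), hdrop]
    rfl
  · have hjN : j < m.length := by omega
    have hdrop : (m.map lastOneA).drop j
        = lastOneA (m.getD j "") :: ((m.map lastOneA).drop (j + 1)) := by
      rw [← List.getElem_cons_drop (by simpa using hjN)]
      rw [List.getElem_map, ← List.getD_eq_getElem m "" hjN]
    rw [innerA, dif_pos hjN, hdrop]
    by_cases hle : lastOneA (m.getD j "") ≤ (i : Int)
    · rw [if_pos hle]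
      simp only [findK, if_pos hle]
      rw [makeSwapsA_eq m i j hij hjN]
      simp
    · rw [if_neg hle]
      simp only [findK, if_neg hle]
      rw [ihn (j + 1) (by omega) (by omega)]
      cases hft : findK ((m.map lastOneA).drop (j + 1)) (i : Int) with
      | none => simp
      | some k' =>
        simp only [Option.map_some]
        have harith : j + 1 + k' = j + (k' + 1) := by omega
        simp only [harith]

-- the outer loop of A equals the forward work-list loop on the dropped index list
theorem outer_eq (N : Nat) : ∀ (i : Nat), ∀ (m : List String) (moves : Int),
    m.length = N → outerA m i N moves = loopF ((m.map lastOneA).drop i) (i : Int) moves := by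
  intro i
  induction' hn : N - i with n ihn generalizing i
  · intro m moves hN
    have hdrop : (m.map lastOneA).drop i = [] :=
      List.drop_eq_nil_of_le (by simp; omega)
    rw [outerA, dif_neg (by omega), hdrop, loopF]
  · intro m moves hN
    have hiN : i < N := by omega
    rw [outerA, dif_pos hiN]
    subst hN
    set last := m.map lastOneA with hlast
    have hdrop : last.drop i = lastOneA (m.getD i "") :: (last.drop (i + 1)) := by
      rw [hlast, ← List.getElem_cons_drop (by simpa using hiN)]
      rw [List.getElem_map, ← List.getD_eq_getElem m "" hiN]
    rw [innerA_eq m i i le_rfl]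
    cases hft : findK (last.drop i) (i : Int) with
    | some k =>
      have hk : k < (last.drop i).length := findK_lt _ _ _ hft
      have hik : i + k < m.length := by
        rw [List.length_drop, hlast, List.length_map] at hk; omega
      dsimp only [hft]
      set m' := m.take i ++ m.getD (i + k) "" :: ((m.eraseIdx (i + k)).drop i) with hm'
      have hlen' : m'.length = m.length := by
        rw [hm']
        simp only [List.length_append, List.length_take, List.length_cons,
          List.length_drop, List.length_eraseIdx]
        split_ifs <;> omega
      have hmap' : (m'.map lastOneA).drop (i + 1) = (last.drop i).eraseIdx k := by
        rw [hm', List.map_append, List.map_take, List.map_cons, List.map_drop,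
          ← List.eraseIdx_map, ← hlast]
        rw [List.append_cons, List.drop_left' (by
          rw [List.length_append, List.length_take]; simp [hlast]; omega)]
        rw [drop_eraseIdx]
      rw [hdrop] at hft
      rw [hdrop, loopF_some _ _ _ _ _ hft, ← hdrop, ← hmap']
      have harith : ((i : Int) + 1) = ((i + 1 : Nat) : Int) := by push_cast; ring
      have harith2 : moves + (((i + k : Nat) : Int) - (i : Int)) = moves + (k : Int) := by
        push_cast; ring
      rw [harith, harith2]
      exact ihn (i + 1) (by omega) m' _ (by omega)
    | none =>
      dsimp only [hft]
      rw [hdrop] at hft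
      rw [hdrop, loopF_none _ _ _ _ hft]
      have harith : ((i : Int) + 1) = ((i + 1 : Nat) : Int) := by push_cast; ring
      rw [harith, hlast]
      simpa using ihn (i + 1) (by omega) m moves rfl

-- the scan never reads past its start index, so a trailing element is invisible
theorem scanB_append (l : List Int) (w : Int) (i k : Int)
    (hk : k < (l.length : Int)) : scanB (l ++ [w]) i k = scanB l i k := by
  by_cases h0 : 0 ≤ k
  · have hget : PySem.List.pyGet? (l ++ [w]) k = PySem.List.pyGet? l k := by
      rw [PySem.List.pyGet?_of_nonneg (l ++ [w]) h0, PySem.List.pyGet?_of_nonneg l h0,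
        List.getElem?_append_left (by omega : k.toNat < l.length)]
    conv_lhs => rw [scanB]
    conv_rhs => rw [scanB]
    rw [hget]
    split_ifs with h
    · exact scanB_append l w i (k - 1) (by omega)
    · rfl
  · conv_lhs => rw [scanB]
    conv_rhs => rw [scanB]
    rw [dif_neg (fun h => h0 h.1), dif_neg (fun h => h0 h.1)]
termination_by (k + 1).toNat
decreasing_by omega

-- B's downward scan over the reversed list computes the forward search
theorem scanB_eq (zs : List Int) (i : Int) :
    scanB zs.reverse i ((zs.length : Int) - 1)
      = (match findK zs i with
          | some k => ((zs.length : Int) - 1 - (k : Int))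
          | none => -1) := by
  induction zs with
  | nil =>
    rw [scanB, dif_neg]
    · simp [findK]
    · intro h
      have := h.1
      simp at this
  | cons w ws ih =>
    have hlen : (((w :: ws).length : Int) - 1) = ((ws.reverse.length : Nat) : Int) := by
      simp
    rw [List.reverse_cons, hlen, scanB]
    have hget : (PySem.List.pyGet? (ws.reverse ++ [w]) ((ws.reverse.length : Nat) : Int)).getD 0 = w := by
      rw [PySem.List.pyGet?_append_length ws.reverse [] w]
      rfl
    rw [hget]
    by_cases hw : i < w
    · rw [dif_pos ⟨Int.natCast_nonneg _, hw⟩]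
      have hlt : ((ws.reverse.length : Nat) : Int) - 1 < (ws.reverse.length : Int) := by omega
      rw [scanB_append _ _ _ _ hlt]
      have hidx : ((ws.reverse.length : Nat) : Int) - 1 = ((ws.length : Int) - 1) := by simp
      rw [hidx, ih]
      simp only [findK, if_neg (by omega : ¬ w ≤ i)]
      cases hft : findK ws i with
      | none => simp
      | some k' =>
        simp only [Option.map_some, List.length_reverse]
        push_cast
        ring
    · rw [dif_neg (fun h => hw h.2)]
      simp only [findK, if_pos (by omega : w ≤ i)]
      simp

-- erasing at the mirrored index commutes with reversal
theorem reverse_eraseIdx {α : Type} (zs : List α) (k : Nat) (hk : k < zs.length) :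
    zs.reverse.eraseIdx (zs.length - 1 - k) = (zs.eraseIdx k).reverse := by
  induction zs generalizing k with
  | nil => simp at hk
  | cons a t ih =>
    cases k with
    | zero =>
      have h1 : (a :: t).length - 1 - 0 = t.reverse.length := by simp
      rw [List.reverse_cons, h1, List.eraseIdx_eq_take_drop_succ,
        List.take_left' rfl, List.drop_eq_nil_of_le (by simp), List.append_nil]
      rfl
    | succ k =>
      have hk' : k < t.length := by simp at hk; omega
      have h1 : (a :: t).length - 1 - (k + 1) = t.length - 1 - k := by
        simp; omega
      rw [List.reverse_cons, h1, List.eraseIdx_eq_take_drop_succ,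
        List.take_append_of_le_length (by simp; omega),
        List.drop_append_of_le_length (by simp; omega),
        ← List.append_assoc, ← List.eraseIdx_eq_take_drop_succ, ih k hk',
        List.eraseIdx_cons_succ, List.reverse_cons]

-- B's loop on the reversed work-list equals the forward loop
theorem loopRev_eq (N : Nat) : ∀ (zs : List Int), zs.length ≤ N →
    ∀ (i moves : Int), loopB zs.reverse i moves = loopF zs i moves := by
  induction N with
  | zero =>
    intro zs hzs i moves
    have : zs = [] := by cases zs <;> simp_all
    subst this
    rw [List.reverse_nil, loopB_nil, loopF_nil]
  | succ N ihN =>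
    intro zs hzs i moves
    cases zs with
    | nil => rw [List.reverse_nil, loopB_nil, loopF_nil]
    | cons w ws =>
      rcases hys : (w :: ws).reverse with _ | ⟨v, t⟩
      · exfalso; have := congrArg List.length hys; simp at this
      · rw [loopB]
        simp only [← hys]
        have hlenr : (((w :: ws).reverse.length : Nat) : Int) - 1
            = (((w :: ws).length : Nat) : Int) - 1 := by simp
        rw [hlenr, scanB_eq (w :: ws) i]
        cases hft : findK (w :: ws) i with
        | some k =>
          have hk : k < (w :: ws).length := findK_lt _ _ _ hft
          dsimp only
          rw [dif_pos (by
            have hl : (w :: ws).length = ws.length + 1 := rfl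
            have h2 : (k : Int) < (((w :: ws).length : Nat) : Int) := by exact_mod_cast hk
            linarith)]
          have htn : ((((w :: ws).length : Nat) : Int) - 1 - (k : Int)).toNat
              = (w :: ws).length - 1 - k := by omega
          have hmov : moves + ((((w :: ws).length : Nat) : Int) - 1
              - ((((w :: ws).length : Nat) : Int) - 1 - (k : Int))) = moves + (k : Int) := by
            omega
          rw [htn, hmov, reverse_eraseIdx _ _ hk,
            ihN ((w :: ws).eraseIdx k) (by
              rw [List.length_eraseIdx, if_pos hk]
              have hl : (w :: ws).length = ws.length + 1 := rfl
              omega),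
            loopF_some _ _ _ _ _ hft]
        | none =>
          dsimp only
          rw [dif_neg (by omega), List.dropLast_reverse, List.tail_cons,
            ihN ws (by
              have hl : (w :: ws).length = ws.length + 1 := rfl
              omega),
            loopF_none _ _ _ _ hft]

-- ===== VERDICT (by name: the statement is the Claim_ definition above) =====
theorem solve_spec : Claim_equal_solve := by
  intro matrix _
  unfold Spec_solve solve solve_alt
  have hmap : matrix.map lastIdxB = matrix.map lastOneA :=
    List.map_congr_left (fun r _ => lastB_eq_lastA r)
  rw [hmap, loopRev_eq (matrix.map lastOneA).length _ le_rfl]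
  have := outer_eq matrix.length 0 matrix 0 rfl
  simpa using this
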